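-- pv_equiv track=rewrite | github.com/Mahmud-cse/Algorithms_for_Competitive_Programming_in_Python | Searching_and_Sorting/query_duplicates_in_a_range.py | closest_left_duplicate
-- ===== SOURCE A (Python) =====
-- from collections import defaultdict
--
-- def closest_left_duplicate(aa):
-- 	n = len(aa)
-- 	pp = [-1]*n
-- 	last_seen = defaultdict()
-- 	for i, ai in enumerate(aa):
-- 		if ai in last_seen:
-- 			pp[i] = last_seen[ai]
-- 		last_seen[ai] = i
-- 	return pp
-- ===== SOURCE B (Python) =====
-- def closest_left_duplicate(aa):
--     # two-phase: group all indices by value, then pair consecutive occurrences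
--     positions = {}
--     for i, ai in enumerate(aa):
--         positions.setdefault(ai, []).append(i)
--     pp = [-1] * len(aa)
--     for idxs in positions.values():
--         for prev, cur in zip(idxs, idxs[1:]):
--             pp[cur] = prev
--     return pp
-- ===== Notes on version B (the rewrite author's own statement) =====
-- stated objective: alternative
-- what changed: Replaces A's single pass with an inline last-seen membership check by a two-phase group-by: first build a value -> list-of-indices table, then emit pp[cur]=prev for each consecutive pair of every value's occurrence list.
import Mathlib
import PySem

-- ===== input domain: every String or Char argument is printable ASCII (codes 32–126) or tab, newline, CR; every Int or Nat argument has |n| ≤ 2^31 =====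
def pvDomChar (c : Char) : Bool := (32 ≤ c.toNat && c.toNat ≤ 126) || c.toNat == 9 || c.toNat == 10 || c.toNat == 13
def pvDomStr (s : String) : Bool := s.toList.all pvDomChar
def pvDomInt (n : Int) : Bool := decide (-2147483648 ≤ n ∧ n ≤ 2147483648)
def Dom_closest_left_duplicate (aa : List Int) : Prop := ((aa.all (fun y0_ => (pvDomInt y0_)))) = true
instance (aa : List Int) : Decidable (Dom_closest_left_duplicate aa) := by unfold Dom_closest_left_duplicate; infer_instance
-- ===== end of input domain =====

-- B replaces A's single pass with its inline last-seen check by a two-phase group-by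
-- (value -> occurrence-index list, then pairing consecutive occurrences); an alternative
-- decomposition with the same cost and the same return value.

-- ===== PORT A =====
-- literal port of A: one pass; pp[i] = last_seen[ai] when ai was seen before, then last_seen[ai] = i
def closest_left_duplicate (aa : List Int) : List Int :=
  let n := aa.length
  ((PySem.List.enumerate aa).foldl
    (fun (s : List Int × PySem.Dict Int Int) (p : Int × Int) =>
      (if s.2.contains p.2 then PySem.List.pySetD s.1 p.1 (s.2.getD p.2 0) else s.1,
       s.2.insert p.2 p.1))
    (List.replicate n (-1 : Int), PySem.Dict.empty)).1

-- ===== PORT B =====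
-- literal port of B: positions.setdefault(ai, []).append(i) is d[ai] = d.get(ai, []) + [i],
-- i.e. Dict.modify; then for each value's list, zip(idxs, idxs[1:]) writes pp[cur] = prev
def closest_left_duplicate_alt (aa : List Int) : List Int :=
  let positions : PySem.Dict Int (List Int) :=
    (PySem.List.enumerate aa).foldl
      (fun d p => d.modify p.2 [] (fun ls => ls ++ [p.1])) PySem.Dict.empty
  let pp0 : List Int := List.replicate aa.length (-1 : Int)
  positions.values.foldl
    (fun pp idxs =>
      (idxs.zip (idxs.drop 1)).foldl (fun pp pc => PySem.List.pySetD pp pc.2 pc.1) pp)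
    pp0

-- ===== PRECONDITION & SPEC =====
def Spec_closest_left_duplicate (aa : List Int) (out : List Int) : Prop := out = closest_left_duplicate_alt aa
instance (aa : List Int) (out : List Int) : Decidable (Spec_closest_left_duplicate aa out) := by unfold Spec_closest_left_duplicate; infer_instance

-- ===== CLAIM (what is proved, stated in full; the proofs are below) =====
def Claim_equal_closest_left_duplicate : Prop := ∀ (aa : List Int), Dom_closest_left_duplicate aa → Spec_closest_left_duplicate aa (closest_left_duplicate aa)

-- ===== LEMMAS AND PROOFS =====

-- occN aa v: all indices (in increasing order) at which aa holds value v
def occN (aa : List Int) (v : Int) : List Nat :=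
  (List.range aa.length).filter (fun t => aa.getD t 0 == v)

-- prevN aa j: the closest index t < j with aa[t] = aa[j], if any
def prevN (aa : List Int) (j : Nat) : Option Nat :=
  ((List.range j).filter (fun t => aa.getD t 0 == aa.getD j 0)).getLast?

def specElem (aa : List Int) (j : Nat) : Int :=
  match prevN aa j with
  | some t => (t : Int)
  | none => -1

def specOut (aa : List Int) : List Int := (List.range aa.length).map (specElem aa)

lemma specOut_length (aa : List Int) : (specOut aa).length = aa.length := by
  simp [specOut]

-- the Nat-indexed form of B's inner write loop
def wsetN (l : List Nat) (pp : List Int) : List Int :=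
  (l.zip (l.drop 1)).foldl (fun pp pc => pp.set pc.2 ((pc.1 : Nat) : Int)) pp

lemma wsetN_cons_cons (a b : Nat) (t : List Nat) (pp : List Int) :
    wsetN (a :: b :: t) pp = wsetN (b :: t) (pp.set b (a : Int)) := rfl

lemma wsetN_length (l : List Nat) (pp : List Int) : (wsetN l pp).length = pp.length := by
  induction l generalizing pp with
  | nil => rfl
  | cons a t ih =>
    cases t with
    | nil => rfl
    | cons b t' => rw [wsetN_cons_cons, ih]; simp

lemma wsetN_getElem?_not_mem (l : List Nat) (pp : List Int) (j : Nat) (hj : j ∉ l.drop 1) :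
    (wsetN l pp)[j]? = pp[j]? := by
  induction l generalizing pp with
  | nil => rfl
  | cons a t ih =>
    cases t with
    | nil => rfl
    | cons b t' =>
      simp only [List.drop_succ_cons, List.drop_zero, List.mem_cons, not_or] at hj
      rw [wsetN_cons_cons, ih _ (by simpa using hj.2),
        List.getElem?_set_ne (fun h => hj.1 h.symm)]

lemma wsetN_getElem?_mem (pre rest : List Nat) (j : Nat) (pp : List Int)
    (hpre : j ∉ pre) (hrest : j ∉ rest) (hj : j < pp.length) :
    (wsetN (pre ++ j :: rest) pp)[j]? =
      match pre.getLast? with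
      | some t => some ((t : Int))
      | none => pp[j]? := by
  induction pre generalizing pp with
  | nil =>
    simpa using wsetN_getElem?_not_mem (j :: rest) pp j (by simpa using hrest)
  | cons a pre' ih =>
    cases pre' with
    | nil =>
      rw [List.cons_append, List.nil_append, wsetN_cons_cons,
        wsetN_getElem?_not_mem _ _ _ (by simpa using hrest),
        List.getElem?_set_self (by simpa using hj)]
      rfl
    | cons c pre'' =>
      have hj' : j ∉ c :: pre'' := fun h => hpre (List.mem_cons_of_mem a h)
      rw [List.cons_append, List.cons_append, wsetN_cons_cons, ← List.cons_append,
        ih _ hj' (by simpa using hj)]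
      cases hgl : (c :: pre'').getLast? with
      | none => simp at hgl
      | some t => rw [List.getLast?_cons_cons, hgl]

lemma mem_occN (aa : List Int) (v : Int) (t : Nat) :
    t ∈ occN aa v ↔ t < aa.length ∧ aa.getD t 0 = v := by
  simp [occN]

lemma range_filter_decomp (n j : Nat) (hj : j < n) (P : Nat → Bool) (hP : P j = true) :
    (List.range n).filter P =
      (List.range j).filter P ++
        j :: (((List.range (n - (j + 1))).map (fun k => j + 1 + k)).filter P) := by
  obtain ⟨m, rfl⟩ : ∃ m, n = j + 1 + m := ⟨n - (j + 1), by omega⟩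
  rw [show j + 1 + m - (j + 1) = m by omega]
  rw [List.range_add, List.filter_append, List.range_succ, List.filter_append,
    List.filter_singleton, hP]
  simp

lemma occN_decomp (aa : List Int) (j : Nat) (hj : j < aa.length) :
    occN aa (aa.getD j 0) =
      ((List.range j).filter (fun t => aa.getD t 0 == aa.getD j 0)) ++
        j :: (((List.range (aa.length - (j + 1))).map (fun k => j + 1 + k)).filter
          (fun t => aa.getD t 0 == aa.getD j 0)) := by
  unfold occN
  exact range_filter_decomp aa.length j hj _ (by simp)

-- the whole second-phase fold, element by element
lemma phase2_getElem? (aa : List Int) (V : List Int) (pp : List Int)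
    (hpp : pp.length = aa.length) (j : Nat) (hj : j < aa.length) :
    (V.foldl (fun pp v => wsetN (occN aa v) pp) pp)[j]? =
      if aa.getD j 0 ∈ V then
        (match prevN aa j with
         | some t => some ((t : Int))
         | none => pp[j]?)
      else pp[j]? := by
  induction V generalizing pp with
  | nil => simp
  | cons v V' ih =>
    rw [List.foldl_cons]
    have hlen : (wsetN (occN aa v) pp).length = aa.length := by rw [wsetN_length, hpp]
    by_cases hv : aa.getD j 0 = v
    · have hpre : j ∉ (List.range j).filter (fun t => aa.getD t 0 == aa.getD j 0) := by
        intro h; have := List.mem_range.mp (List.mem_of_mem_filter h); omega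
      have hrest : j ∉ ((List.range (aa.length - (j + 1))).map (fun k => j + 1 + k)).filter
          (fun t => aa.getD t 0 == aa.getD j 0) := by
        intro h
        obtain ⟨k, _, hk⟩ := List.mem_map.mp (List.mem_of_mem_filter h)
        omega
      have hinner : (wsetN (occN aa v) pp)[j]? =
          match prevN aa j with
          | some t => some ((t : Int))
          | none => pp[j]? := by
        rw [← hv, occN_decomp aa j hj, wsetN_getElem?_mem _ _ _ _ hpre hrest (by omega)]
        rfl
      rw [if_pos (show aa.getD j 0 ∈ v :: V' by rw [hv]; exact List.mem_cons_self),
        ih _ hlen]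
      by_cases hmem : aa.getD j 0 ∈ V'
      · rw [if_pos hmem]
        cases h : prevN aa j with
        | some t => simp
        | none => simp [h, hinner]
      · rw [if_neg hmem, hinner]
    · have hnot : j ∉ (occN aa v).drop 1 := by
        intro h
        exact hv ((mem_occN aa v j).mp (List.mem_of_mem_drop h)).2
      rw [ih _ hlen, wsetN_getElem?_not_mem _ _ _ hnot]
      by_cases hmem : aa.getD j 0 ∈ V'
      · rw [if_pos hmem, if_pos (List.mem_cons_of_mem v hmem)]
      · rw [if_neg hmem, if_neg (by simp only [List.mem_cons, not_or]; exact ⟨hv, hmem⟩)]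

lemma phase2_length (aa : List Int) (V : List Int) (pp : List Int) :
    (V.foldl (fun pp v => wsetN (occN aa v) pp) pp).length = pp.length := by
  induction V generalizing pp with
  | nil => rfl
  | cons v V' ih => rw [List.foldl_cons, ih, wsetN_length]

-- B's first phase, named for the proofs
def positionsD (aa : List Int) : PySem.Dict Int (List Int) :=
  (PySem.List.enumerate aa).foldl
    (fun d p => d.modify p.2 [] (fun ls => ls ++ [p.1])) PySem.Dict.empty

lemma enumerate_swap (aa : List Int) :
    (PySem.List.enumerate aa).map (fun p => (p.2, p.1)) =
      (List.range aa.length).map (fun t => (aa.getD t 0, (t : Int))) := by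
  have h := PySem.List.enumerate_eq_map_pyRange (xs := aa) (0 : Int)
  rw [show PySem.List.enumerate aa = PySem.List.enumerate aa 0 from rfl, h]
  rw [show PySem.List.pyRange 0 (PySem.List.len aa) 1 = (List.range aa.length).map Nat.cast by
    simp [PySem.List.pyRange_zero_natCast, PySem.List.len]]
  simp [List.map_map, Function.comp_def]

lemma getD_positionsD (aa : List Int) (v : Int) :
    (positionsD aa).getD v [] = (occN aa v).map (fun t : Nat => (t : Int)) := by
  unfold positionsD
  rw [show (PySem.List.enumerate aa).foldl
        (fun d p => d.modify p.2 [] (fun ls => ls ++ [p.1])) PySem.Dict.empty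
      = ((PySem.List.enumerate aa).map (fun p => (p.2, p.1))).foldl
        (fun d q => d.modify q.1 [] (fun ls => ls ++ [q.2])) PySem.Dict.empty by
    rw [List.foldl_map]]
  rw [PySem.Dict.getD_foldl_modify_append, enumerate_swap, List.filter_map, List.map_map]
  unfold occN
  simp only [PySem.Dict.getD_empty, List.nil_append, Function.comp_def]

lemma keys_positionsD (aa : List Int) : (positionsD aa).keys = PySem.Set.ofList aa := by
  unfold positionsD
  rw [PySem.Dict.keys_foldl_modify_key (PySem.List.enumerate aa) (·.2) []
    (fun _ x => fun ls => ls ++ [x.1]) PySem.Dict.empty]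
  rw [PySem.List.map_snd_enumerate]
  rfl

lemma nodup_keys_positionsD (aa : List Int) : (positionsD aa).keys.Nodup := by
  unfold positionsD
  exact PySem.Dict.nodup_keys_foldl_modify_key (PySem.List.enumerate aa) (·.2) []
    (fun _ x => fun ls => ls ++ [x.1]) PySem.Dict.empty (by simp [PySem.Dict.keys_empty])

lemma writeLoop_natCast (lN : List Nat) (pp : List Int) :
    ((lN.map (fun t => ((t : Nat) : Int))).zip ((lN.map (fun t => ((t : Nat) : Int))).drop 1)).foldl
        (fun pp pc => PySem.List.pySetD pp pc.2 pc.1) pp = wsetN lN pp := by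
  rw [show (lN.map (fun t => ((t : Nat) : Int))).drop 1
      = (lN.drop 1).map (fun t => ((t : Nat) : Int)) by simp,
    List.zip_map, List.foldl_map]
  unfold wsetN
  apply PySem.List.foldl_congr_mem
  intro acc x _
  simp [Prod.map]

lemma B_eq_spec (aa : List Int) : closest_left_duplicate_alt aa = specOut aa := by
  have hvals : (positionsD aa).values =
      (PySem.Set.ofList aa).map (fun v => (occN aa v).map (fun t : Nat => (t : Int))) := by
    rw [PySem.Dict.values_eq_map_keys (positionsD aa) (nodup_keys_positionsD aa) [],
      keys_positionsD]
    exact List.map_congr_left fun v _ => getD_positionsD aa v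
  show (positionsD aa).values.foldl
      (fun pp idxs => (idxs.zip (idxs.drop 1)).foldl
        (fun pp pc => PySem.List.pySetD pp pc.2 pc.1) pp)
      (List.replicate aa.length (-1 : Int)) = specOut aa
  rw [hvals, List.foldl_map]
  simp only [writeLoop_natCast]
  apply List.ext_getElem?
  intro j
  by_cases hj : j < aa.length
  · rw [phase2_getElem? aa _ _ (by simp) j hj]
    have hmem : aa.getD j 0 ∈ PySem.Set.ofList aa := by
      rw [PySem.Set.mem_ofList, List.getD_eq_getElem?_getD, List.getElem?_eq_getElem hj]
      exact List.getElem_mem hj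
    rw [if_pos hmem,
      show (specOut aa)[j]? = some (specElem aa j) by simp [specOut, hj]]
    unfold specElem
    cases h : prevN aa j with
    | some t => rfl
    | none => simp [hj]
  · rw [List.getElem?_eq_none (by rw [phase2_length, List.length_replicate]; omega),
      List.getElem?_eq_none (by rw [specOut_length]; omega)]

-- ===== the A side =====

def dictOf (aa : List Int) : PySem.Dict Int Int :=
  (PySem.List.enumerate aa).foldl (fun d p => d.insert p.2 p.1) PySem.Dict.empty

lemma enumerate_concat (xs : List Int) (x : Int) :
    PySem.List.enumerate (xs ++ [x]) = PySem.List.enumerate xs ++ [((xs.length : Int), x)] := by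
  rw [show PySem.List.enumerate (xs ++ [x]) = PySem.List.enumerate (xs ++ [x]) 0 from rfl,
    PySem.List.enumerate_append]
  simp [PySem.List.enumerate_cons, PySem.List.enumerate_nil]

lemma dictOf_concat (xs : List Int) (x : Int) :
    dictOf (xs ++ [x]) = (dictOf xs).insert x (xs.length : Int) := by
  unfold dictOf
  rw [enumerate_concat, List.foldl_append]
  rfl

lemma getD_concat_lt (xs : List Int) (x : Int) (t : Nat) (h : t < xs.length) :
    (xs ++ [x]).getD t 0 = xs.getD t 0 := List.getD_append _ _ _ _ h

lemma getD_concat_len (xs : List Int) (x : Int) : (xs ++ [x]).getD xs.length 0 = x := by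
  simp [List.getD]

lemma occN_concat (xs : List Int) (x v : Int) :
    occN (xs ++ [x]) v = occN xs v ++ (if x == v then [xs.length] else []) := by
  unfold occN
  rw [show (xs ++ [x]).length = xs.length + 1 by simp, List.range_succ, List.filter_append]
  congr 1
  · apply List.filter_congr
    intro t ht
    rw [getD_concat_lt xs x t (List.mem_range.mp ht)]
  · rw [List.filter_singleton, getD_concat_len]
    cases h : x == v <;> simp [h]

lemma prevN_concat (xs : List Int) (x : Int) (j : Nat) (hj : j < xs.length) :
    prevN (xs ++ [x]) j = prevN xs j := by
  unfold prevN
  rw [getD_concat_lt xs x j hj]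
  congr 1
  apply List.filter_congr
  intro t ht
  rw [getD_concat_lt xs x t (by have := List.mem_range.mp ht; omega)]

lemma specOut_concat (xs : List Int) (x : Int) :
    specOut (xs ++ [x]) = specOut xs ++
      [match (occN xs x).getLast? with | some t => (t : Int) | none => -1] := by
  unfold specOut
  rw [show (xs ++ [x]).length = xs.length + 1 by simp, List.range_succ, List.map_append]
  congr 1
  · apply List.map_congr_left
    intro j hj
    unfold specElem
    rw [prevN_concat xs x j (List.mem_range.mp hj)]
  · simp only [List.map_cons, List.map_nil]
    congr 1
    unfold specElem prevN
    rw [getD_concat_len,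
      show (List.range xs.length).filter (fun t => (xs ++ [x]).getD t 0 == x)
        = (List.range xs.length).filter (fun t => xs.getD t 0 == x) from
      List.filter_congr fun t ht => by rw [getD_concat_lt xs x t (List.mem_range.mp ht)]]
    rfl

lemma get?_dictOf (xs : List Int) (v : Int) :
    (dictOf xs).get? v = ((occN xs v).getLast?).map (fun t => ((t : Nat) : Int)) := by
  induction xs using List.reverseRecOn with
  | nil => simp [dictOf, occN, PySem.List.enumerate_nil, PySem.Dict.get?_empty]
  | append_singleton xs x ih =>
    rw [dictOf_concat, PySem.Dict.get?_insert, occN_concat]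
    by_cases hv : v = x
    · rw [if_pos hv, show (x == v) = true by simp [hv]]
      simp
    · rw [if_neg hv, show (x == v) = false by simp; omega]
      simp [ih]

lemma set_concat_mid (l : List Int) (extra : Nat) (v : Int) :
    (l ++ List.replicate (extra + 1) (-1 : Int)).set l.length v
      = (l ++ [v]) ++ List.replicate extra (-1 : Int) := by
  rw [List.replicate_succ, List.set_append_right _ _ (Nat.le_refl _)]
  simp

lemma A_main (xs : List Int) : ∀ (extra : Nat),
    (PySem.List.enumerate xs).foldl
      (fun (s : List Int × PySem.Dict Int Int) (p : Int × Int) =>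
        (if s.2.contains p.2 then PySem.List.pySetD s.1 p.1 (s.2.getD p.2 0) else s.1,
         s.2.insert p.2 p.1))
      (List.replicate (xs.length + extra) (-1 : Int), PySem.Dict.empty)
    = (specOut xs ++ List.replicate extra (-1 : Int), dictOf xs) := by
  induction xs using List.reverseRecOn with
  | nil =>
    intro extra
    simp [PySem.List.enumerate_nil, specOut, dictOf]
  | append_singleton xs x ih =>
    intro extra
    rw [enumerate_concat, List.foldl_append,
      show (xs ++ [x]).length + extra = xs.length + (extra + 1) by simp; omega,
      ih (extra + 1), List.foldl_cons, List.foldl_nil]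
    rw [PySem.Dict.contains_eq_isSome_get?, get?_dictOf, dictOf_concat, specOut_concat]
    cases h : (occN xs x).getLast? with
    | none =>
      simp only [Option.map_none, Option.isSome_none, Bool.false_eq_true, if_false]
      rw [Prod.mk.injEq]
      refine ⟨?_, rfl⟩
      rw [List.replicate_succ, List.append_cons]
    | some t =>
      simp only [Option.map_some, Option.isSome_some, if_true]
      rw [PySem.Dict.getD_eq_get?_getD, get?_dictOf, h]
      rw [Prod.mk.injEq]
      refine ⟨?_, rfl⟩
      simp only [Option.map_some, Option.getD_some]
      rw [PySem.List.pySetD_natCast]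
      rw [show xs.length = (specOut xs).length from (specOut_length xs).symm]
      rw [set_concat_mid]

lemma A_eq_spec (aa : List Int) : closest_left_duplicate aa = specOut aa := by
  have h := A_main aa 0
  rw [Nat.add_zero] at h
  show ((PySem.List.enumerate aa).foldl
      (fun (s : List Int × PySem.Dict Int Int) (p : Int × Int) =>
        (if s.2.contains p.2 then PySem.List.pySetD s.1 p.1 (s.2.getD p.2 0) else s.1,
         s.2.insert p.2 p.1))
      (List.replicate aa.length (-1 : Int), PySem.Dict.empty)).1 = specOut aa
  rw [h]
  simp

-- ===== VERDICT (by name: the statement is the Claim_ definition above) =====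
theorem closest_left_duplicate_spec : Claim_equal_closest_left_duplicate := by
  intro aa _
  unfold Spec_closest_left_duplicate
  rw [A_eq_spec, B_eq_spec]
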